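-- pv_equiv track=rewrite | github.com/ramscodehub/Automated-Prediction | __init__.py | minmax_normalisation
-- ===== SOURCE A (Python) =====
-- def minmax_normalisation(dataframe):
--     """returns a list of min max values for each feature in a dataset"""
--     minmax = list()
--     for i in range(len(dataframe[0])):
--         colValues = [row[i] for row in dataframe]
--         minValue = min(colValues)
--         maxValue = max(colValues)
--         minmax.append([minValue, maxValue])
--     return minmax
-- ===== SOURCE B (Python) =====
-- def minmax_normalisation(dataframe):
--     """returns a list of min max values for each feature in a dataset"""
--     pairs = [(v, v) for v in dataframe[0]]
--     for row in dataframe[1:]: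
--         pairs = [(v if v < lo else lo, v if v > hi else hi)
--                  for (lo, hi), v in zip(pairs, row)]
--     return [[lo, hi] for lo, hi in pairs]
-- ===== Notes on version B (the rewrite author's own statement) =====
-- stated objective: alternative
-- what changed: B replaces A's per-column rescan of the whole dataframe (build column i, call min and max) by a single streaming pass over the rows that maintains a running (min, max) pair for every column, initialised from the first row.
-- outside the precondition, e.g. on minmax_normalisation([[1, 2], [3]]): A raises IndexError, B returns [[1, 3]]; on minmax_normalisation([]): A raises IndexError, B raises IndexError
import Mathlib
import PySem

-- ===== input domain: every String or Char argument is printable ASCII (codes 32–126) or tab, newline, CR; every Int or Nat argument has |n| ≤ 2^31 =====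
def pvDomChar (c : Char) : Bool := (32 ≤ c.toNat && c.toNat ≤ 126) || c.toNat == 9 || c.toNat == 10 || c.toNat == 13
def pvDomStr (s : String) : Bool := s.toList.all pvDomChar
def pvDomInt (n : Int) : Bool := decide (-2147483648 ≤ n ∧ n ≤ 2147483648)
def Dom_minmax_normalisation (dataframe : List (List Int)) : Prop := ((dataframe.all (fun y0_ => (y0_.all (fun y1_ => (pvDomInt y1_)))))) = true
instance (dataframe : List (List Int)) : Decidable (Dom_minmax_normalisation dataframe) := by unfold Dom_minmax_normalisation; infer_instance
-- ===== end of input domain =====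

-- B makes one streaming pass over the rows, maintaining a running (min, max) pair per
-- column, instead of A's per-column rescan of the whole dataframe (simpler decomposition).

-- ===== PORT A =====
-- for i in range(len(dataframe[0])): colValues = [row[i] for row in dataframe]; append [min, max]
def minmax_normalisation (dataframe : List (List Int)) : List (List Int) :=
  (PySem.List.pyRange 0 ((dataframe.headD []).length : Int) 1).foldl
    (fun minmax i =>
      let colValues := dataframe.map (fun row => (PySem.List.pyGet? row i).getD 0)
      let minValue := (PySem.List.min? colValues (fun y => y)).getD 0
      let maxValue := (PySem.List.max? colValues (fun y => y)).getD 0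
      minmax ++ [[minValue, maxValue]]) []

-- ===== PORT B =====
-- pairs = [(v, v) for v in dataframe[0]]; one pass over dataframe[1:] updating each pair via zip
def minmax_normalisation_alt (dataframe : List (List Int)) : List (List Int) :=
  match dataframe with
  | [] => []  -- dataframe[0] raises IndexError in Python; outside Pre_
  | first :: rest =>
    let pairs0 := first.map (fun v => (v, v))
    let pairs := rest.foldl
      (fun ps row =>
        (ps.zip row).map (fun pv =>
          (if pv.2 < pv.1.1 then pv.2 else pv.1.1,
           if pv.2 > pv.1.2 then pv.2 else pv.1.2))) pairs0
    pairs.map (fun p => [p.1, p.2])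

-- ===== PRECONDITION & SPEC =====
-- Pre_ excludes exactly the inputs on which Python A raises IndexError: the empty
-- dataframe, and ragged dataframes where some row is shorter than the first row.
def Pre_minmax_normalisation (dataframe : List (List Int)) : Prop :=
  dataframe ≠ [] ∧ ∀ row ∈ dataframe, (dataframe.headD []).length ≤ row.length
instance (dataframe : List (List Int)) : Decidable (Pre_minmax_normalisation dataframe) := by
  unfold Pre_minmax_normalisation; infer_instance
def pvWitness_minmax_normalisation : List (List Int) := [[3, -1, 7], [0, 5, 2]]

def Spec_minmax_normalisation (dataframe : List (List Int)) (out : List (List Int)) : Prop := out = minmax_normalisation_alt dataframe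
instance (dataframe : List (List Int)) (out : List (List Int)) : Decidable (Spec_minmax_normalisation dataframe out) := by unfold Spec_minmax_normalisation; infer_instance

-- ===== CLAIM (what is proved, stated in full; the proofs are below) =====
def Claim_equal_minmax_normalisation : Prop := ∀ (dataframe : List (List Int)), Dom_minmax_normalisation dataframe → Pre_minmax_normalisation dataframe → Spec_minmax_normalisation dataframe (minmax_normalisation dataframe)

-- ===== LEMMAS AND PROOFS =====

-- value of row[k] as both programs read it inside Pre_ (index in range)
def pvG (row : List Int) (k : Nat) : Int := row[k]?.getD 0

theorem pv_foldl_append {α β : Type} (f : α → β) (l : List α) (acc : List β) :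
    l.foldl (fun a i => a ++ [f i]) acc = acc ++ l.map f := by
  induction l generalizing acc with
  | nil => simp
  | cons x t ih => simp [List.foldl_cons, ih]

-- A's result, in closed map form
theorem pvA_eq (first : List Int) (rest : List (List Int)) :
    minmax_normalisation (first :: rest) =
      (List.range first.length).map (fun k =>
        [rest.foldl (fun a r => min a (pvG r k)) (pvG first k),
         rest.foldl (fun a r => max a (pvG r k)) (pvG first k)]) := by
  unfold minmax_normalisation
  rw [PySem.List.pyRange_zero_nat, List.foldl_map, pv_foldl_append]
  simp only [List.nil_append, List.headD_cons]
  apply List.map_congr_left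
  intro k _
  simp only [PySem.List.pyGet?_natCast, List.map_cons, PySem.List.min?_id_cons,
    PySem.List.max?_id_cons, Option.getD_some, List.foldl_map]
  rfl

theorem pv_zip_map_range (n : Nat) (f : Nat → Int × Int) (row : List Int)
    (h : n ≤ row.length) :
    ((List.range n).map f).zip row = (List.range n).map (fun k => (f k, pvG row k)) := by
  apply List.ext_getElem
  · simp [List.length_zip]; omega
  · intro k h1 h2
    have hk : k < n := by simpa using h2
    have hr : k < row.length := lt_of_lt_of_le hk h
    simp [pvG, List.getElem_zip, List.getElem?_eq_getElem hr]

-- B's fold over the remaining rows, in closed map form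
theorem pvB_fold (n : Nat) (rest : List (List Int)) (f : Nat → Int × Int)
    (h : ∀ r ∈ rest, n ≤ r.length) :
    rest.foldl
      (fun ps row =>
        (ps.zip row).map (fun pv =>
          (if pv.2 < pv.1.1 then pv.2 else pv.1.1,
           if pv.2 > pv.1.2 then pv.2 else pv.1.2)))
      ((List.range n).map f) =
    (List.range n).map (fun k =>
      rest.foldl (fun p r =>
        (if pvG r k < p.1 then pvG r k else p.1,
         if pvG r k > p.2 then pvG r k else p.2)) (f k)) := by
  induction rest generalizing f with
  | nil => simp
  | cons r t ih =>
    simp only [List.foldl_cons]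
    rw [pv_zip_map_range n f r (h r (List.mem_cons_self ..)), List.map_map]
    rw [ih _ (fun x hx => h x (List.mem_cons_of_mem _ hx))]
    rfl

-- the per-column pair fold splits into the min fold and the max fold
theorem pv_pair_fold (k : Nat) (rest : List (List Int)) (p : Int × Int) :
    rest.foldl (fun p r =>
        (if pvG r k < p.1 then pvG r k else p.1,
         if pvG r k > p.2 then pvG r k else p.2)) p =
      (rest.foldl (fun a r => min a (pvG r k)) p.1,
       rest.foldl (fun a r => max a (pvG r k)) p.2) := by
  induction rest generalizing p with
  | nil => rfl
  | cons r t ih =>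
    simp only [List.foldl_cons, ih]
    congr 1 <;> [skip; skip] <;>
      · congr 1
        simp only [min_def, max_def]
        split_ifs <;> omega

theorem pv_init_pairs (first : List Int) :
    first.map (fun v => (v, v)) = (List.range first.length).map (fun k => (pvG first k, pvG first k)) := by
  apply List.ext_getElem
  · simp
  · intro k h1 h2
    have : k < first.length := by simpa using h1
    simp [pvG, List.getElem?_eq_getElem this]

-- ===== VERDICT (by name: the statement is the Claim_ definition above) =====
theorem minmax_normalisation_spec : Claim_equal_minmax_normalisation := by
  intro dataframe _ hpre
  obtain ⟨hne, hlen⟩ := hpre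
  match dataframe with
  | [] => exact absurd rfl hne
  | first :: rest =>
    unfold Spec_minmax_normalisation
    rw [pvA_eq]
    show _ = (rest.foldl _ (first.map (fun v => (v, v)))).map _
    rw [pv_init_pairs, pvB_fold first.length rest _
      (fun r hr => by simpa using hlen r (List.mem_cons_of_mem _ hr))]
    rw [List.map_map]
    apply List.map_congr_left
    intro k _
    simp [pv_pair_fold]
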